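-- pv_equiv track=rewrite | github.com/asebn1/python_algorithm | 프로그래머스 2단계/43. 이진 변환 반복하기.py | solution
-- ===== SOURCE A (Python) =====
-- def solution(s):
--     cnt = 0
--     zero = 0
--     while 1:
--         # 1. 2진변환
--         cnt += 1
--         zero += s.count('0')
--         s = s.replace('0', '')
--         # 2. 개수
--         n = len(s)
--         # 3. 결과
--         s = str(format(n, 'b'))
--         if s == '1':
--             break
--     return [cnt, zero]
-- ===== SOURCE B (Python) =====
-- def solution(s):
--     # Build the whole popcount trajectory first, then aggregate it in separate passes.
--     ones = [len(s) - s.count('0')]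
--     while ones[-1] != 1:
--         ones.append(ones[-1].bit_count())
--     total_len = len(s) + sum(o.bit_length() for o in ones[:-1])
--     return [len(ones), total_len - sum(ones)]
-- ===== Notes on version B (the rewrite author's own statement) =====
-- stated objective: alternative
-- what changed: Instead of A's single while-loop that rebuilds a string and accumulates cnt/zero as it goes, B first materialises the whole popcount trajectory as a list and then derives both answers by separate aggregate passes: cnt is the list's length and zero is (total characters of all stages) minus (sum of the trajectory), never accumulating during the loop and never building intermediate binary strings.
import Mathlib
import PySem

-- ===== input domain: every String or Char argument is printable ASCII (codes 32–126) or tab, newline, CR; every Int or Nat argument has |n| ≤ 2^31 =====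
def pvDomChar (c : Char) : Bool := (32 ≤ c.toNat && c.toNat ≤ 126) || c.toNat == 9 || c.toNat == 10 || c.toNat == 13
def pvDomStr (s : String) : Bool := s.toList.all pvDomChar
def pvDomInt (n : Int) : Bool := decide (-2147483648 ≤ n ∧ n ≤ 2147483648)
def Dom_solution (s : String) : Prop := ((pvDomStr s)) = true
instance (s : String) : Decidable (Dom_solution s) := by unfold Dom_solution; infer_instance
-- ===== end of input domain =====

-- B builds the whole popcount trajectory as a list first and then derives both outputs by
-- separate aggregate passes (length / sums), instead of A's accumulate-while-rebuilding loop.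

-- ===== PORT A =====
-- hand port of format(n, 'b'): minimal binary digits, most significant first, '0' for 0 (exact)
def bitsLSB : Nat → List Char
  | 0 => []
  | n+1 => (if (n+1) % 2 = 1 then '1' else '0') :: bitsLSB ((n+1)/2)

def binRep (n : Nat) : List Char := if n = 0 then ['0'] else (bitsLSB n).reverse

-- the 'while 1' loop of A; the fuel only makes the function total (never exhausted under Pre_)
def solutionLoop : Nat → List Char → Int → Int → List Int
  | 0, _, cnt, zero => [cnt, zero]
  | fuel+1, s, cnt, zero =>
    let cnt := cnt + 1
    let zero := zero + (PySem.Chars.count s ['0'] : Int)       -- s.count('0')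
    let s := PySem.Chars.replace s ['0'] []                    -- s.replace('0', '')
    let n := s.length                                          -- len(s)
    let s2 := binRep n                                         -- str(format(n, 'b'))
    if s2 = ['1'] then [cnt, zero] else solutionLoop fuel s2 cnt zero

def solution (s : String) : List Int :=
  solutionLoop (s.toList.length + 1) s.toList 0 0

-- ===== PORT B =====
-- the trajectory-building 'while ones[-1] != 1' loop of Source B, written back-to-front
-- (append at the head of the recursion's result = Python's append at the tail);
-- the fuel only makes the function total (never exhausted under Pre_)
def buildChain : Nat → Int → List Int
  | 0, o => [o]
  | f+1, o => if o = 1 then [o] else o :: buildChain f ((PySem.Int.bitCount o : Nat) : Int)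

def solution_alt (s : String) : List Int :=
  let ones0 : Int := PySem.Str.len s - (PySem.Str.count s "0" : Int)
  let ones := buildChain ones0.toNat ones0
  let totalLen : Int :=
    PySem.Str.len s + (ones.dropLast.map (fun o => ((PySem.Int.bitLength o : Nat) : Int))).sum
  [(ones.length : Int), totalLen - ones.sum]

-- ===== PRECONDITION & SPEC =====
-- Pre_ excludes exactly the strings consisting only of '0' (including ""), on which A's
-- while-loop never terminates (and B's loop likewise): A returns no value there.
def Pre_solution (s : String) : Prop := s.toList.any (fun c => c != '0') = true
instance (s : String) : Decidable (Pre_solution s) := by unfold Pre_solution; infer_instance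

def pvWitness_solution : String := ("110")

def Spec_solution (s : String) (out : List Int) : Prop := out = solution_alt s
instance (s : String) (out : List Int) : Decidable (Spec_solution s out) := by unfold Spec_solution; infer_instance

-- ===== CLAIM (what is proved, stated in full; the proofs are below) =====
def Claim_equal_solution : Prop := ∀ (s : String), Dom_solution s → Pre_solution s → Spec_solution s (solution s)

-- ===== LEMMAS AND PROOFS =====

lemma pc_le (m : Nat) : PySem.Int.bitCount (m : Int) ≤ m := by
  induction m using Nat.strong_induction_on with
  | _ m ih =>
    match m with
    | 0 => simp
    | n+1 =>
      rw [PySem.Int.bitCount_natCast (m := n+1) (by omega)]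
      have := ih ((n+1)/2) (by omega)
      omega

lemma pc_lt (m : Nat) (h : 2 ≤ m) : PySem.Int.bitCount (m : Int) < m := by
  match m with
  | n+1 =>
    rw [PySem.Int.bitCount_natCast (m := n+1) (by omega)]
    have := pc_le ((n+1)/2)
    omega

lemma pc_pos (m : Nat) (h : 1 ≤ m) : 1 ≤ PySem.Int.bitCount (m : Int) := by
  induction m using Nat.strong_induction_on with
  | _ m ih =>
    match m with
    | n+1 =>
      rw [PySem.Int.bitCount_natCast (m := n+1) (by omega)]
      by_cases hp : (n+1) % 2 = 1
      · omega
      · have h2 : 1 ≤ (n+1)/2 := by omega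
        have := ih ((n+1)/2) (by omega) h2
        omega

lemma bl_pos (m : Nat) (h : 1 ≤ m) : 1 ≤ PySem.Int.bitLength (m : Int) := by
  match m with
  | n+1 => rw [PySem.Int.bitLength_natCast (m := n+1) (by omega)]; omega

-- the length of format(m,'b')'s digit list is bit_length(m)
lemma bits_len (m : Nat) : (bitsLSB m).length = PySem.Int.bitLength (m : Int) := by
  induction m using Nat.strong_induction_on with
  | _ m ih =>
    match m with
    | 0 => simp [bitsLSB]
    | n+1 =>
      rw [PySem.Int.bitLength_natCast (m := n+1) (by omega)]
      simp [bitsLSB, ih ((n+1)/2) (by omega)]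

-- removing the zeros of format(m,'b') leaves bit_count(m) characters
lemma bits_filter_len (m : Nat) :
    ((bitsLSB m).filter (fun c => c != '0')).length = PySem.Int.bitCount (m : Int) := by
  induction m using Nat.strong_induction_on with
  | _ m ih =>
    match m with
    | 0 => simp [bitsLSB]
    | n+1 =>
      rw [PySem.Int.bitCount_natCast (m := n+1) (by omega)]
      by_cases hp : (n+1) % 2 = 1 <;>
        simp [bitsLSB, hp, ih ((n+1)/2) (by omega)] <;> omega

-- the number of '0' characters in format(m,'b') plus bit_count(m) is bit_length(m)
lemma bits_count0 (m : Nat) :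
    (bitsLSB m).count '0' + PySem.Int.bitCount (m : Int) = PySem.Int.bitLength (m : Int) := by
  induction m using Nat.strong_induction_on with
  | _ m ih =>
    match m with
    | 0 => simp [bitsLSB]
    | n+1 =>
      rw [PySem.Int.bitCount_natCast (m := n+1) (by omega),
        PySem.Int.bitLength_natCast (m := n+1) (by omega)]
      have := ih ((n+1)/2) (by omega)
      by_cases hp : (n+1) % 2 = 1 <;>
        simp [bitsLSB, hp] at this ⊢ <;> omega

lemma binRep_one : binRep 1 = ['1'] := by
  simp [binRep, bitsLSB]

lemma binRep_eq_one_iff (m : Nat) : binRep m = ['1'] ↔ m = 1 := by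
  constructor
  · intro h
    match m with
    | 0 => simp [binRep] at h
    | 1 => rfl
    | n+2 =>
      exfalso
      have hl : (binRep (n+2)).length = PySem.Int.bitLength ((n+2 : Nat) : Int) := by
        simp [binRep, bits_len]
      rw [h, PySem.Int.bitLength_natCast (m := n+2) (by omega)] at hl
      have := bl_pos ((n+2)/2) (by omega)
      simp only [List.length_singleton] at hl
      omega
  · intro h; subst h; exact binRep_one

-- PySem.Chars.count with the single-character needle '0' is character counting
lemma count_go_singleton (l : List Char) : ∀ (fuel : Nat) (acc : Nat), l.length ≤ fuel →
    PySem.Chars.count.go ['0'] fuel l acc = acc + l.count '0' := by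
  induction l with
  | nil => intro fuel acc _; cases fuel <;> simp [PySem.Chars.count.go]
  | cons c t ih =>
    intro fuel acc hf
    match fuel with
    | f+1 =>
      rw [PySem.Chars.count.go]
      by_cases hc : c = '0'
      · subst hc
        rw [if_pos (by simp [List.isPrefixOf])]
        have hdrop : List.drop ['0'].length ('0' :: t) = t := rfl
        rw [hdrop, ih f (acc+1) (by simp at hf; omega)]
        simp
        omega
      · rw [if_neg (by simp [List.isPrefixOf]; exact fun h => hc h.symm),
          ih f acc (by simp at hf; omega)]
        simp [hc]

lemma chars_count_zero (l : List Char) : PySem.Chars.count l ['0'] = l.count '0' := by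
  rw [PySem.Chars.count]
  rw [if_neg (by simp)]
  simpa using count_go_singleton l l.length 0 le_rfl

-- PySem.Chars.replace deleting the single character '0' is filtering
lemma replace_go_singleton (l : List Char) : ∀ (fuel : Nat) (acc : List Char),
    l.length ≤ fuel →
    PySem.Chars.replace.go ['0'] [] fuel l acc = acc.reverse ++ l.filter (fun c => c != '0') := by
  induction l with
  | nil => intro fuel acc _; cases fuel <;> simp [PySem.Chars.replace.go]
  | cons c t ih =>
    intro fuel acc hf
    match fuel with
    | f+1 =>
      rw [PySem.Chars.replace.go]
      by_cases hc : c = '0'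
      · subst hc
        rw [if_pos (by simp [List.isPrefixOf])]
        have hdrop : List.drop ['0'].length ('0' :: t) = t := rfl
        rw [hdrop, ih f _ (by simp at hf; omega)]
        simp
      · rw [if_neg (by simp [List.isPrefixOf]; exact fun h => hc h.symm),
          ih f (c :: acc) (by simp at hf; omega)]
        simp [hc]

lemma chars_replace_zero (l : List Char) :
    PySem.Chars.replace l ['0'] [] = l.filter (fun c => c != '0') := by
  rw [PySem.Chars.replace]
  rw [if_neg (by simp)]
  simpa using replace_go_singleton l l.length [] le_rfl

-- the common fuel-free meaning of A's loop, recursing on the ones-count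
def loopSpec (m : Nat) (cnt zero : Int) : List Int :=
  if _h : m ≤ 1 then [cnt, zero]
  else loopSpec (PySem.Int.bitCount (m : Int)) (cnt + 1)
         (zero + ((PySem.Int.bitLength (m : Int) : Int) - (PySem.Int.bitCount (m : Int) : Int)))
termination_by m
decreasing_by exact pc_lt m (by omega)

lemma binRep_count0 (m : Nat) (h : 1 ≤ m) :
    ((binRep m).count '0' : Int)
      = (PySem.Int.bitLength (m : Int) : Int) - (PySem.Int.bitCount (m : Int) : Int) := by
  have h0 : m ≠ 0 := by omega
  have hc : (binRep m).count '0' + PySem.Int.bitCount (m : Int) = PySem.Int.bitLength (m : Int) := by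
    simpa [binRep, h0, List.count_reverse] using bits_count0 m
  omega

lemma binRep_filter_len (m : Nat) (h : 1 ≤ m) :
    ((binRep m).filter (fun c => c != '0')).length = PySem.Int.bitCount (m : Int) := by
  have h0 : m ≠ 0 := by omega
  simp [binRep, h0, List.filter_reverse, bits_filter_len]

lemma A_loop (f : Nat) : ∀ (m : Nat) (cnt zero : Int), 2 ≤ m → m ≤ f →
    solutionLoop f (binRep m) cnt zero = loopSpec m cnt zero := by
  induction f with
  | zero => intro m _ _ h hf; omega
  | succ f ih =>
    intro m cnt zero hm hf
    rw [solutionLoop]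
    simp only [chars_count_zero, chars_replace_zero, binRep_filter_len m (by omega),
      binRep_count0 m (by omega)]
    rw [loopSpec, dif_neg (by omega)]
    by_cases h1 : PySem.Int.bitCount (m : Int) = 1
    · rw [if_pos (by rw [h1]; exact binRep_one), h1, loopSpec, dif_pos (by omega)]
    · have hge : 2 ≤ PySem.Int.bitCount (m : Int) := by
        have := pc_pos m (by omega); omega
      rw [if_neg (by rw [binRep_eq_one_iff]; exact h1)]
      exact ih _ _ _ hge (by have := pc_lt m hm; omega)

lemma buildChain_ne_nil (f : Nat) (o : Int) : buildChain f o ≠ [] := by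
  cases f
  · simp [buildChain]
  · simp only [buildChain]; split <;> simp

-- B's chain, aggregated, computes exactly what A's loop accumulates
lemma B_chain (f : Nat) : ∀ (m : Nat) (cnt zero : Int), 1 ≤ m → m ≤ f →
    loopSpec m cnt zero
      = [cnt - 1 + ((buildChain f (m : Int)).length : Int),
         zero + (m : Int)
           + ((buildChain f (m : Int)).dropLast.map
                (fun o => ((PySem.Int.bitLength o : Nat) : Int))).sum
           - (buildChain f (m : Int)).sum] := by
  induction f with
  | zero => intro m _ _ h hf; omega
  | succ f ih =>
    intro m cnt zero hm hf
    by_cases h1 : m = 1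
    · subst h1
      rw [loopSpec, dif_pos (by omega)]
      simp [buildChain]
    · have hm2 : 2 ≤ m := by omega
      rw [loopSpec, dif_neg (by omega)]
      have hne : ((m : Int) = 1) = False := by
        simp; exact_mod_cast h1
      rw [buildChain, if_neg (by exact_mod_cast h1)]
      have hpc1 : 1 ≤ PySem.Int.bitCount (m : Int) := pc_pos m (by omega)
      have hpcf : PySem.Int.bitCount (m : Int) ≤ f := by
        have := pc_lt m hm2; omega
      rw [ih (PySem.Int.bitCount (m : Int)) (cnt + 1) _ hpc1 hpcf]
      have htail := buildChain_ne_nil f ((PySem.Int.bitCount (m : Int) : Nat) : Int)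
      rw [List.dropLast_cons_of_ne_nil htail]
      have hbl : PySem.Int.bitLength ((m : Nat) : Int) = PySem.Int.bitLength (m : Int) := rfl
      simp only [List.map_cons, List.sum_cons, List.length_cons, List.sum_cons]
      push_cast
      ring_nf

-- len(s) splits into the '0's and the rest
lemma count0_filter_len (l : List Char) :
    l.count '0' + (l.filter (fun c => c != '0')).length = l.length := by
  induction l with
  | nil => simp
  | cons c t ih =>
    by_cases hc : c = '0' <;> simp [hc] <;> omega

-- ===== VERDICT (by name: the statement is the Claim_ definition above) =====
theorem solution_spec : Claim_equal_solution := by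
  intro s _ hpre
  unfold Spec_solution solution solution_alt
  set l := s.toList with hl
  have hones : 1 ≤ (l.filter (fun c => c != '0')).length := by
    unfold Pre_solution at hpre
    rw [List.any_eq_true] at hpre
    obtain ⟨c, hc, hcne⟩ := hpre
    exact List.length_pos_of_mem (List.mem_filter.mpr ⟨hc, hcne⟩)
  set m0 := (l.filter (fun c => c != '0')).length with hm0
  have hsplit := count0_filter_len l
  have hcount : PySem.Str.count s "0" = l.count '0' := by
    rw [PySem.Str.count_eq]; exact chars_count_zero l
  have hlen : PySem.Str.len s = (l.length : Int) := PySem.Str.len_eq s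
  have hO : PySem.Str.len s - (PySem.Str.count s "0" : Int) = (m0 : Int) := by
    rw [hcount, hlen]; omega
  have hOt : (PySem.Str.len s - (PySem.Str.count s "0" : Int)).toNat = m0 := by
    rw [hO]; omega
  -- the B side: evaluate it through B_chain
  have hB := B_chain m0 m0 1 (l.count '0' : Int) hones le_rfl
  -- the A side: unroll the first iteration of the while-loop
  rw [solutionLoop]
  have hLS : PySem.Str.len s = (l.count '0' : Int) + (m0 : Int) := by
    rw [hlen]; exact_mod_cast congrArg (Nat.cast : Nat → Int) hsplit.symm
  simp only [chars_count_zero, chars_replace_zero, ← hm0, hO, Int.toNat_natCast, zero_add]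
  by_cases h1 : m0 = 1
  · rw [if_pos (by rw [binRep_eq_one_iff]; exact h1), h1]
    have hsl : l.length = s.length := by rw [hl]; simp
    simp [buildChain]
    omega
  · rw [if_neg (by rw [binRep_eq_one_iff]; exact h1),
      A_loop l.length m0 _ _ (by omega) (by omega), hB]
    simp only [List.cons.injEq, and_true]
    constructor
    · ring
    · rw [hLS]
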